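-- pv_equiv track=rewrite | github.com/Chelovecki/ege_bk | 14/kompege/9914 base.py | third_cond
-- ===== SOURCE A (Python) =====
-- def third_cond(number:int):
--     res = ''
--     while number != 0:
--         res += str(number % 5)
--         number //= 5
--     res = res[::-1]
--     while res[0] == "0":
--         res = res[1:]
--     s = set(res)
--     q = [res.count(i) for i in s]
--     count_nechet = sum([i % 2 for i in q])
--     if len(res) % 2 == 0:
--         return count_nechet == 0
--     return count_nechet == 1
-- ===== SOURCE B (Python) =====
-- def third_cond(number: int):
--     # One pass: toggle each base-5 digit's membership in a set while converting;
--     # at the end len(odd) = number of digits with an odd count.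
--     odd = set()
--     length = 0
--     while number != 0:
--         d = number % 5
--         if d in odd:
--             odd.discard(d)
--         else:
--             odd.add(d)
--         length += 1
--         number //= 5
--     if length % 2 == 0:
--         return len(odd) == 0
--     return len(odd) == 1
-- ===== Notes on version B (the rewrite author's own statement) =====
-- stated objective: alternative
-- what changed: Instead of building the base-5 digit string, reversing/stripping it and summing the per-distinct-digit count parities over set(res), B keeps a single toggle-set of digits seen an odd number of times during one conversion loop and compares its size to the length parity.
-- outside the precondition, e.g. on third_cond(0): A raises IndexError, B returns True
import Mathlib
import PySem

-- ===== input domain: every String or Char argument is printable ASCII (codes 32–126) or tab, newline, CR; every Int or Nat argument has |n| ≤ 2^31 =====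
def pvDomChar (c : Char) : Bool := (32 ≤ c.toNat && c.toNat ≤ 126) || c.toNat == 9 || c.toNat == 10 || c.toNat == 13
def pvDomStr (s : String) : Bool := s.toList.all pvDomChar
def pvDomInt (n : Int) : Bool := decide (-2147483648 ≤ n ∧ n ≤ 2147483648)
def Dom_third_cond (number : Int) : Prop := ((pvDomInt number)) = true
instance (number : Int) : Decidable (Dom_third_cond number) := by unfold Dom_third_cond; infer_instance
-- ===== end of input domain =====

-- B replaces A's digit-string + per-distinct-digit count pass by a single toggle-set pass; equivalent for number > 0.

-- ===== PORT A =====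
-- while number != 0: res += str(number % 5); number //= 5
-- (for number < 0 the Python loop never terminates — those inputs are outside Pre_; the guard 0 < number only totalises)
def pvADigits (number : Int) (res : List Char) : List Char :=
  if 0 < number then
    pvADigits (PySem.Int.floordiv number 5) (res ++ PySem.Int.toChars (PySem.Int.mod number 5))
  else res
termination_by number.toNat
decreasing_by
  rw [PySem.Int.floordiv_eq_ediv_of_pos (by omega : (0:Int) < 5)]
  omega

-- while res[0] == "0": res = res[1:]   (none = IndexError on empty res)
def pvAStrip (res : List Char) : Option (List Char) :=
  match res with
  | [] => none
  | c :: rest => if c = '0' then pvAStrip rest else some (c :: rest)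

def third_cond (number : Int) : Bool :=
  let res0 := pvADigits number []
  let res1 := res0.reverse  -- res[::-1]; exact by PySem.List.slice?_none_none_neg_one
  match pvAStrip res1 with
  | none => false  -- Python raises IndexError here (number = 0); excluded by Pre_
  | some res =>
    let s : PySem.Set Char := PySem.Set.ofList res
    let q : List Int := s.map (fun i => (res.count i : Int))
    let count_nechet : Int := (q.map (fun i => PySem.Int.mod i 2)).sum
    if PySem.Int.mod ((res.length : Int)) 2 == 0 then count_nechet == 0 else count_nechet == 1

-- ===== PORT B =====
def pvBLoop (number : Int) (odd : PySem.Set Int) (length : Int) : PySem.Set Int × Int :=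
  if 0 < number then  -- Python: while number != 0; negatives diverge, outside Pre_
    let d := PySem.Int.mod number 5
    let odd' := if odd.contains d then odd.discard d else odd.add d
    pvBLoop (PySem.Int.floordiv number 5) odd' (length + 1)
  else (odd, length)
termination_by number.toNat
decreasing_by
  rw [PySem.Int.floordiv_eq_ediv_of_pos (by omega : (0:Int) < 5)]
  omega

def third_cond_alt (number : Int) : Bool :=
  let st := pvBLoop number PySem.Set.empty 0
  if PySem.Int.mod st.2 2 == 0 then PySem.Set.len st.1 == 0 else PySem.Set.len st.1 == 1

-- ===== PRECONDITION & SPEC =====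
-- Pre_ excludes number = 0 (A raises IndexError) and number < 0 (A's while loop never terminates).
def Pre_third_cond (number : Int) : Prop := 0 < number
instance (number : Int) : Decidable (Pre_third_cond number) := by unfold Pre_third_cond; infer_instance
def pvWitness_third_cond : Int := (7)

def Spec_third_cond (number : Int) (out : Bool) : Prop := out = third_cond_alt number
instance (number : Int) (out : Bool) : Decidable (Spec_third_cond number out) := by unfold Spec_third_cond; infer_instance

-- ===== CLAIM (what is proved, stated in full; the proofs are below) =====
def Claim_equal_third_cond : Prop := ∀ (number : Int), Dom_third_cond number → Pre_third_cond number → Spec_third_cond number (third_cond number)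

-- ===== LEMMAS AND PROOFS =====

-- the base-5 digits of n, least significant first, as integers
def pvDigits (n : Int) : List Int :=
  if 0 < n then PySem.Int.mod n 5 :: pvDigits (PySem.Int.floordiv n 5) else []
termination_by n.toNat
decreasing_by
  rw [PySem.Int.floordiv_eq_ediv_of_pos (by omega : (0:Int) < 5)]
  omega

def pvDChar (d : Int) : Char := Char.ofNat (48 + d.toNat)

def pvToggle (s : PySem.Set Int) (d : Int) : PySem.Set Int :=
  if s.contains d then s.discard d else s.add d

lemma pvDigits_eq_nil_iff (n : Int) : pvDigits n = [] ↔ ¬ 0 < n := by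
  rw [pvDigits]; split <;> simp_all

lemma pvDigits_bounds (n : Int) : ∀ d ∈ pvDigits n, 0 ≤ d ∧ d < 5 := by
  induction n using pvDigits.induct with
  | case1 n h ih =>
      rw [pvDigits, if_pos h]
      intro d hd
      rcases List.mem_cons.1 hd with h1 | h1
      · subst h1
        exact ⟨PySem.Int.mod_nonneg n (by omega), PySem.Int.mod_lt n (by omega)⟩
      · exact ih d h1
  | case2 n h =>
      rw [pvDigits, if_neg h]; simp

lemma pvToChars_digit (d : Int) (h0 : 0 ≤ d) (h5 : d < 5) :
    PySem.Int.toChars d = [pvDChar d] := by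
  interval_cases d <;> decide

lemma pvDChar_ne_zero_char (d : Int) (h0 : 0 ≤ d) (h5 : d < 5) (hne : d ≠ 0) :
    pvDChar d ≠ '0' := by
  interval_cases d <;> first | (exact absurd rfl hne) | decide

lemma pvDChar_inj {a b : Int} (ha0 : 0 ≤ a) (ha5 : a < 5) (hb0 : 0 ≤ b) (hb5 : b < 5)
    (h : pvDChar a = pvDChar b) : a = b := by
  interval_cases a <;> interval_cases b <;> first | rfl | (exact absurd h (by decide))

lemma pvADigits_eq (n : Int) (res : List Char) :
    pvADigits n res = res ++ (pvDigits n).map pvDChar := by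
  induction n, res using pvADigits.induct with
  | case1 n res h ih =>
      rw [pvADigits, if_pos h, ih]
      conv_rhs => rw [pvDigits, if_pos h]
      rw [pvToChars_digit _ (PySem.Int.mod_nonneg n (by omega)) (PySem.Int.mod_lt n (by omega))]
      simp
  | case2 n res h =>
      rw [pvADigits, if_neg h, pvDigits, if_neg h]
      simp

lemma pvBLoop_eq (n : Int) (odd : PySem.Set Int) (len : Int) :
    pvBLoop n odd len = ((pvDigits n).foldl pvToggle odd, len + ((pvDigits n).length : Int)) := by
  induction n, odd, len using pvBLoop.induct with
  | case1 n odd len h d odd2 ih =>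
      have hodd2 : odd2 = pvToggle odd d := rfl
      rw [pvBLoop, if_pos h]
      show pvBLoop (PySem.Int.floordiv n 5) odd2 (len + 1) = _
      rw [ih, hodd2]
      conv_rhs => rw [pvDigits, if_pos h]
      simp only [List.foldl_cons, List.length_cons, Prod.mk.injEq]
      constructor
      · rfl
      · push_cast; ring
  | case2 n odd len h =>
      rw [pvBLoop, if_neg h]
      conv_rhs => rw [pvDigits, if_neg h]
      simp

lemma pvToggle_mem (s : PySem.Set Int) (d x : Int) :
    x ∈ pvToggle s d ↔ (if x = d then x ∉ s else x ∈ s) := by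
  unfold pvToggle
  by_cases hc : s.contains d = true
  · have hd : d ∈ s := (PySem.Set.contains_iff s d).1 hc
    rw [if_pos hc, PySem.Set.mem_discard]
    by_cases hxd : x = d <;> simp [hxd, hd]
  · have hd : d ∉ s := fun h => hc ((PySem.Set.contains_iff s d).2 h)
    rw [if_neg hc, PySem.Set.mem_add]
    by_cases hxd : x = d <;> simp [hxd, hd]

lemma pvToggle_nodup (s : PySem.Set Int) (d : Int) (hs : s.Nodup) : (pvToggle s d).Nodup := by
  unfold pvToggle
  split
  · exact PySem.Set.nodup_discard s d hs
  · exact PySem.Set.nodup_add s d hs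

lemma foldl_toggle_nodup (L : List Int) (s : PySem.Set Int) (hs : s.Nodup) :
    (L.foldl pvToggle s).Nodup := by
  induction L generalizing s with
  | nil => exact hs
  | cons d t ih => exact ih (pvToggle s d) (pvToggle_nodup s d hs)

lemma foldl_toggle_mem (L : List Int) (s : PySem.Set Int) (x : Int) :
    x ∈ L.foldl pvToggle s ↔
      ((x ∈ s ∧ L.count x % 2 = 0) ∨ (x ∉ s ∧ L.count x % 2 = 1)) := by
  induction L generalizing s with
  | nil => simp
  | cons d t ih =>
      rw [List.foldl_cons, ih, List.count_cons]
      by_cases hxd : x = d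
      · subst hxd
        rw [pvToggle_mem]
        by_cases hx : x ∈ s <;> simp [hx] <;> omega
      · rw [pvToggle_mem]
        have hdx : ¬ d = x := fun h => hxd h.symm
        simp [hxd, hdx]

lemma mem_foldl_toggle_empty (L : List Int) (x : Int) :
    x ∈ L.foldl pvToggle PySem.Set.empty ↔ L.count x % 2 = 1 := by
  rw [foldl_toggle_mem]
  simp [PySem.Set.empty]

lemma count_map_pvDChar (L : List Int) (hB : ∀ d ∈ L, 0 ≤ d ∧ d < 5)
    (d : Int) (hd0 : 0 ≤ d) (hd5 : d < 5) :
    (L.map pvDChar).count (pvDChar d) = L.count d := by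
  rw [List.count_eq_countP, List.countP_map, List.count_eq_countP]
  apply List.countP_congr
  intro x hx
  simp only [Function.comp]
  constructor
  · intro h
    have hx' := hB x hx
    have : pvDChar x = pvDChar d := by simpa using h
    simpa using pvDChar_inj hx'.1 hx'.2 hd0 hd5 this
  · intro h
    have : x = d := by simpa using h
    simp [this]

lemma count_sum_eq (L : List Int) (hB : ∀ d ∈ L, 0 ≤ d ∧ d < 5) :
    ((((PySem.Set.ofList ((L.map pvDChar).reverse)).map
        (fun i => (((L.map pvDChar).reverse).count i : Int))).map
          (fun i => PySem.Int.mod i 2)).sum)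
      = ((L.foldl pvToggle PySem.Set.empty).length : Int) := by
  set R : List Char := (L.map pvDChar).reverse with hR
  set T : PySem.Set Int := L.foldl pvToggle PySem.Set.empty with hT
  rw [List.map_map]
  have hcongr : ∀ c ∈ PySem.Set.ofList R,
      ((fun i => PySem.Int.mod i 2) ∘ fun i => ((R.count i : Nat) : Int)) c
        = if (R.count c % 2 == 1) then (1:Int) else 0 := by
    intro c _
    simp only [Function.comp]
    rw [show (2:Int) = ((2:Nat):Int) from rfl, PySem.Int.mod_natCast]
    rcases Nat.mod_two_eq_zero_or_one (R.count c) with h | h <;> simp [h]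
  rw [List.map_congr_left hcongr, PySem.List.sum_map_ite_one_zero]
  congr 1
  rw [List.countP_eq_length_filter]
  have nd1 : ((PySem.Set.ofList R).filter (fun c => R.count c % 2 == 1)).Nodup :=
    (PySem.Set.nodup_ofList R).filter _
  have nd2 : (T.map pvDChar).Nodup := by
    apply List.Nodup.map_on _ (foldl_toggle_nodup L PySem.Set.empty List.nodup_nil)
    intro x hx y hy hxy
    have hxL : x ∈ L := List.count_pos_iff.1 (by
      have := (mem_foldl_toggle_empty L x).1 hx; omega)
    have hyL : y ∈ L := List.count_pos_iff.1 (by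
      have := (mem_foldl_toggle_empty L y).1 hy; omega)
    exact pvDChar_inj (hB x hxL).1 (hB x hxL).2 (hB y hyL).1 (hB y hyL).2 hxy
  have hmem : ∀ c, c ∈ (PySem.Set.ofList R).filter (fun c => R.count c % 2 == 1)
      ↔ c ∈ T.map pvDChar := by
    intro c
    rw [List.mem_filter, PySem.Set.mem_ofList]
    constructor
    · rintro ⟨hcR, hodd⟩
      have : c ∈ L.map pvDChar := List.mem_reverse.1 hcR
      obtain ⟨d, hdL, hdc⟩ := List.mem_map.1 this
      refine List.mem_map.2 ⟨d, ?_, hdc⟩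
      rw [mem_foldl_toggle_empty]
      have hcount : R.count c = L.count d := by
        rw [hR, List.count_reverse, ← hdc,
          count_map_pvDChar L hB d (hB d hdL).1 (hB d hdL).2]
      rw [← hcount]
      simpa using hodd
    · intro hc
      obtain ⟨d, hdT, hdc⟩ := List.mem_map.1 hc
      have hodd := (mem_foldl_toggle_empty L d).1 hdT
      have hdL : d ∈ L := List.count_pos_iff.1 (by omega)
      have hcount : R.count c = L.count d := by
        rw [hR, List.count_reverse, ← hdc,
          count_map_pvDChar L hB d (hB d hdL).1 (hB d hdL).2]
      refine ⟨List.mem_reverse.2 (hdc ▸ List.mem_map_of_mem hdL), ?_⟩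
      simp [hcount, hodd]
  have hperm := (List.perm_ext_iff_of_nodup nd1 nd2).2 hmem
  rw [hperm.length_eq, List.length_map]

lemma pvDigits_reverse_head (n : Int) (h : 0 < n) :
    ∃ d t, (pvDigits n).reverse = d :: t ∧ d ≠ 0 ∧ 0 ≤ d ∧ d < 5 := by
  induction n using pvDigits.induct with
  | case1 n h' ih =>
      rw [pvDigits, if_pos h', List.reverse_cons]
      by_cases h5 : 0 < PySem.Int.floordiv n 5
      · obtain ⟨d, t, ht, hd⟩ := ih h5
        exact ⟨d, t ++ [PySem.Int.mod n 5], by rw [ht]; simp, hd⟩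
      · have hnil : pvDigits (PySem.Int.floordiv n 5) = [] := (pvDigits_eq_nil_iff _).2 h5
        refine ⟨PySem.Int.mod n 5, [], by rw [hnil]; simp, ?_, PySem.Int.mod_nonneg n (by omega), PySem.Int.mod_lt n (by omega)⟩
        rw [PySem.Int.floordiv_eq_ediv_of_pos (by omega : (0:Int) < 5)] at h5
        rw [PySem.Int.mod_eq_emod_of_pos (by omega : (0:Int) < 5)]
        omega
  | case2 n h' => exact absurd h h'

lemma pvAStrip_no_zero (c : Char) (t : List Char) (hc : c ≠ '0') :
    pvAStrip (c :: t) = some (c :: t) := by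
  rw [pvAStrip, if_neg hc]

-- ===== VERDICT (by name: the statement is the Claim_ definition above) =====
theorem third_cond_spec : Claim_equal_third_cond := by
  intro n hdom hpre
  have hn : 0 < n := hpre
  show third_cond n = third_cond_alt n
  unfold third_cond third_cond_alt
  rw [pvADigits_eq, pvBLoop_eq]
  simp only [List.nil_append]
  obtain ⟨d, t, ht, hd0, hdl, hdu⟩ := pvDigits_reverse_head n hn
  have hmapped : ((pvDigits n).map pvDChar).reverse = pvDChar d :: (t.map pvDChar) := by
    rw [← List.map_reverse, ht, List.map_cons]
  rw [hmapped, pvAStrip_no_zero _ _ (pvDChar_ne_zero_char d hdl hdu hd0), ← hmapped]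
  have hlen : (((pvDigits n).map pvDChar).reverse.length : Int) = ((pvDigits n).length : Int) := by
    simp
  have hsum := count_sum_eq (pvDigits n) (pvDigits_bounds n)
  simp only [hlen, hsum, zero_add, PySem.Set.len]
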